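-- pv_equiv track=rewrite | github.com/RoknuzzamanRokon/Scanner-v2 | easyOCR.py | clean_mrz_line
-- ===== SOURCE A (Python) =====
-- def clean_mrz_line(line: str) -> str:
--     """
--     Clean and normalize MRZ line
--
--     Args:
--         line: Raw MRZ line text
--
--     Returns:
--         Cleaned MRZ line
--     """
--     # Remove spaces and convert to uppercase
--     cleaned = line.replace(' ', '').upper()
--
--     # Replace common OCR errors
--     replacements = {
--         '0': 'O',  # Zero to O in names
--         '1': 'I',  # One to I in names
--         '8': 'B',  # Eight to B in names (sometimes)
--         '5': 'S',  # Five to S in names (sometimes)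
--     }
--
--     # Only apply replacements in name sections (not in dates/numbers)
--     if cleaned.startswith('P<'):
--         # This is line 1 (names), apply letter replacements
--         for old, new in replacements.items():
--             if old in cleaned[5:]:  # Only in name section
--                 cleaned = cleaned[:5] + cleaned[5:].replace(old, new)
--
--     return cleaned
-- ===== SOURCE B (Python) =====
-- _OCR_TABLE = str.maketrans('0185', 'OIBS')
--
-- def clean_mrz_line(line: str) -> str:
--     """Clean and normalize MRZ line (table-driven single pass over the name section)."""
--     cleaned = line.replace(' ', '').upper()
--     if cleaned.startswith('P<'):
--         cleaned = cleaned[:5] + cleaned[5:].translate(_OCR_TABLE)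
--     return cleaned
-- ===== Notes on version B (the rewrite author's own statement) =====
-- stated objective: idiomatic
-- what changed: Replaces the loop over the replacements dict with four repeated str.replace scans (each rebuilding the string) by one precomputed str.maketrans table and a single translate pass over the name section.
import Mathlib
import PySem

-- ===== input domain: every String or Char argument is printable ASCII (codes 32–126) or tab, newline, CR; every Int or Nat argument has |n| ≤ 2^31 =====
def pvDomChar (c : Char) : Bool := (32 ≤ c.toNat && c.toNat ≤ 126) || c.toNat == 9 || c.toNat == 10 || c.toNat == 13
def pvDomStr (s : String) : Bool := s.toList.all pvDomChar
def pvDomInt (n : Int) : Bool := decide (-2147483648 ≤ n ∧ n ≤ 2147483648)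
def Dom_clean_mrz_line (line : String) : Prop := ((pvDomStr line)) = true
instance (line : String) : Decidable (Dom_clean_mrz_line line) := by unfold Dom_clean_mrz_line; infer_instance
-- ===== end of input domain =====

-- B replaces the four sequential str.replace scans by one table-driven translate pass over the name section (idiomatic; return value only, no mutation involved).

-- ===== PORT A =====
-- one loop step of A: `if old in cleaned[5:]: cleaned = cleaned[:5] + cleaned[5:].replace(old, new)`
def pvStepA (cl : List Char) (p : Char × Char) : List Char :=
  if PySem.Chars.isIn [p.1] (PySem.List.slice cl (some 5) none) then
    PySem.List.slice cl none (some 5) ++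
      PySem.Chars.replace (PySem.List.slice cl (some 5) none) [p.1] [p.2]
  else cl

def clean_mrz_line (line : String) : String :=
  let cleaned := PySem.Chars.upper (PySem.Chars.replace line.toList [' '] [])
  let cleaned :=
    if PySem.Chars.startswith cleaned ['P', '<'] then
      [('0', 'O'), ('1', 'I'), ('8', 'B'), ('5', 'S')].foldl pvStepA cleaned
    else cleaned
  String.ofList cleaned

-- ===== PORT B =====
-- str.maketrans('0185','OIBS') as a character function
def pvOcrTable (c : Char) : Char :=
  if c = '0' then 'O' else if c = '1' then 'I' else if c = '8' then 'B' else if c = '5' then 'S' else c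

def clean_mrz_line_alt (line : String) : String :=
  let cleaned := PySem.Chars.upper (PySem.Chars.replace line.toList [' '] [])
  let cleaned :=
    if PySem.Chars.startswith cleaned ['P', '<'] then
      PySem.List.slice cleaned none (some 5) ++
        (PySem.List.slice cleaned (some 5) none).map pvOcrTable
    else cleaned
  String.ofList cleaned

-- ===== PRECONDITION & SPEC =====
def Spec_clean_mrz_line (line : String) (out : String) : Prop := out = clean_mrz_line_alt line
instance (line : String) (out : String) : Decidable (Spec_clean_mrz_line line out) := by unfold Spec_clean_mrz_line; infer_instance

-- ===== CLAIM (what is proved, stated in full; the proofs are below) =====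
def Claim_equal_clean_mrz_line : Prop := ∀ (line : String), Dom_clean_mrz_line line → Spec_clean_mrz_line line (clean_mrz_line line)

-- ===== LEMMAS AND PROOFS =====

-- single-char substitution
def pvSub (a b c : Char) : Char := if c = a then b else c

theorem pvReplaceGo_single (a b : Char) :
    ∀ (l : List Char) (fuel : Nat) (acc : List Char), l.length ≤ fuel →
      PySem.Chars.replace.go [a] [b] fuel l acc = acc.reverse ++ l.map (pvSub a b) := by
  intro l
  induction l with
  | nil => intro fuel acc _; cases fuel <;> simp [PySem.Chars.replace.go.eq_def]
  | cons c t ih =>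
    intro fuel acc h
    cases fuel with
    | zero => simp at h
    | succ n =>
      have ht : t.length ≤ n := Nat.le_of_succ_le_succ (by simpa using h)
      rw [PySem.Chars.replace.go.eq_def]
      by_cases hc : c = a
      · subst hc
        simp only [List.isPrefixOf, BEq.rfl, Bool.true_and, List.length_cons,
          List.length_nil, Nat.zero_add, List.drop_succ_cons, List.drop_zero,
          List.reverse_cons, List.reverse_nil, List.nil_append, if_true]
        rw [ih n ([b] ++ acc) ht]
        simp [pvSub]
      · have hp : ([a].isPrefixOf (c :: t)) = false := by
          simp [List.isPrefixOf]; exact fun e => hc e.symm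
        simp only [hp, Bool.false_eq_true, if_false]
        rw [ih n (c :: acc) ht]
        simp [pvSub, hc]

theorem pvReplace_single (a b : Char) (s : List Char) :
    PySem.Chars.replace s [a] [b] = s.map (pvSub a b) := by
  rw [PySem.Chars.replace]
  simp only [List.isEmpty_cons, Bool.false_eq_true, if_false]
  simpa using pvReplaceGo_single a b s s.length [] le_rfl

theorem pvMap_id_of_not_isIn (a b : Char) (s : List Char)
    (h : PySem.Chars.isIn [a] s = false) : s.map (pvSub a b) = s := by
  have hmem : a ∉ s := by
    intro hm
    obtain ⟨u, v, rfl⟩ := List.append_of_mem hm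
    rw [PySem.Chars.isIn_eq_false_iff] at h
    exact h ⟨u, v, by simp⟩
  calc s.map (pvSub a b) = s.map id := by
        apply List.map_congr_left
        intro x hx
        have : ¬ x = a := fun e => hmem (e ▸ hx)
        simp [pvSub, this]
    _ = s := List.map_id s

-- each loop step of A rewrites the state to the canonical shape, unconditionally
theorem pvStepA_eq (cl : List Char) (a b : Char) :
    pvStepA cl (a, b) = cl.take 5 ++ (cl.drop 5).map (pvSub a b) := by
  have h1 : PySem.List.slice cl (some 5) none = cl.drop 5 := by simp [pysem]
  have h2 : PySem.List.slice cl none (some 5) = cl.take 5 := by simp [pysem]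
  unfold pvStepA
  rw [h1, h2, pvReplace_single]
  split_ifs with h
  · rfl
  · have hf : PySem.Chars.isIn [a] (cl.drop 5) = false := by
      cases hx : PySem.Chars.isIn [a] (cl.drop 5) <;> simp_all
    rw [pvMap_id_of_not_isIn a b _ hf]
    exact (List.take_append_drop 5 cl).symm

theorem pvShape_take (cs : List Char) (f : Char → Char) :
    (cs.take 5 ++ (cs.drop 5).map f).take 5 = cs.take 5 := by
  by_cases h : 5 ≤ cs.length
  · have hl : (cs.take 5).length = 5 := by simp [List.length_take]; omega
    rw [List.take_append]
    simp [hl, List.take_take]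
  · have hd : cs.drop 5 = [] := List.drop_eq_nil_of_le (by omega)
    simp [hd, List.take_take]

theorem pvShape_drop (cs : List Char) (f : Char → Char) :
    (cs.take 5 ++ (cs.drop 5).map f).drop 5 = (cs.drop 5).map f := by
  by_cases h : 5 ≤ cs.length
  · have hl : (cs.take 5).length = 5 := by simp [List.length_take]; omega
    rw [List.drop_append]
    simp [hl, List.drop_eq_nil_of_le (le_of_eq hl)]
  · have hd : cs.drop 5 = [] := List.drop_eq_nil_of_le (by omega)
    have hl : (cs.take 5).length ≤ 5 := by simp
    simp [hd, List.drop_eq_nil_of_le hl]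

theorem pvStep_canon (cs : List Char) (f : Char → Char) (a b : Char) :
    pvStepA (cs.take 5 ++ (cs.drop 5).map f) (a, b)
      = cs.take 5 ++ (cs.drop 5).map (fun c => pvSub a b (f c)) := by
  rw [pvStepA_eq, pvShape_take, pvShape_drop, List.map_map]
  rfl

theorem pvTable_eq (c : Char) :
    pvSub '5' 'S' (pvSub '8' 'B' (pvSub '1' 'I' (pvSub '0' 'O' c))) = pvOcrTable c := by
  by_cases h0 : c = '0'
  · subst h0; decide
  by_cases h1 : c = '1'
  · subst h1; decide
  by_cases h8 : c = '8'
  · subst h8; decide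
  by_cases h5 : c = '5'
  · subst h5; decide
  simp [pvSub, pvOcrTable, h0, h1, h8, h5]

theorem pvFold_eq (cs : List Char) :
    [('0', 'O'), ('1', 'I'), ('8', 'B'), ('5', 'S')].foldl pvStepA cs
      = cs.take 5 ++ (cs.drop 5).map pvOcrTable := by
  simp only [List.foldl_cons, List.foldl_nil]
  rw [pvStepA_eq cs '0' 'O',
      pvStep_canon cs (pvSub '0' 'O') '1' 'I',
      pvStep_canon cs (fun c => pvSub '1' 'I' (pvSub '0' 'O' c)) '8' 'B',
      pvStep_canon cs (fun c => pvSub '8' 'B' (pvSub '1' 'I' (pvSub '0' 'O' c))) '5' 'S']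
  congr 1
  apply List.map_congr_left
  intro c _
  exact pvTable_eq c

-- ===== VERDICT (by name: the statement is the Claim_ definition above) =====
theorem clean_mrz_line_spec : Claim_equal_clean_mrz_line := by
  intro line _
  unfold Spec_clean_mrz_line clean_mrz_line clean_mrz_line_alt
  by_cases h : PySem.Chars.startswith
      (PySem.Chars.upper (PySem.Chars.replace line.toList [' '] [])) ['P', '<']
  · simp only [h, if_true]
    rw [pvFold_eq]
    simp [pysem]
  · simp [h]
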